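-- pv_equiv track=rewrite | github.com/KirillShirokov/Contest_2023 | 11_sprint/final_A.py | nearest_empty
-- ===== SOURCE A (Python) =====
-- from typing import List, Tuple
--
-- def calculate_distance(length: int, number_house: List[int]) -> List[int]:
--     distance = []
--     empty_position = None
--     for i, value in enumerate(number_house):
--         if value == 0:
--             empty_position = i
--             distance.append(0)
--         elif empty_position is not None:
--             distance.append(i - empty_position)
--         else:
--             distance.append(length)
--     return distance
--
-- def nearest_empty(length: int, number_house: List[int]) -> List[int]:
--     distance = calculate_distance(length, number_house)
--     distance_reverse = calculate_distance(length, reversed(number_house))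
--     distance_reverse.reverse()
--     result = []
--     for step in range(length):
--         result.append(min(distance[step], distance_reverse[step]))
--     return result
-- ===== SOURCE B (Python) =====
-- from typing import List
--
-- def nearest_empty(length: int, number_house: List[int]) -> List[int]:
--     zeros = [i for i, v in enumerate(number_house) if v == 0]
--     result = []
--     k = 0  # number of zero positions strictly below the current step
--     for step in range(length):
--         while k < len(zeros) and zeros[k] < step:
--             k += 1
--         left = step - zeros[k - 1] if k > 0 else length
--         right = zeros[k] - step if k < len(zeros) else length
--         result.append(min(left, right))
--     return result
-- ===== Notes on version B (the rewrite author's own statement) =====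
-- stated objective: alternative
-- what changed: B replaces A's two directional propagation scans (+ list reverse + elementwise min) by a single zeros-index list and a two-pointer sweep: for each step it reads the nearest zero position on each side directly from the sorted zeros list via one monotone pointer.
import Mathlib
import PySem

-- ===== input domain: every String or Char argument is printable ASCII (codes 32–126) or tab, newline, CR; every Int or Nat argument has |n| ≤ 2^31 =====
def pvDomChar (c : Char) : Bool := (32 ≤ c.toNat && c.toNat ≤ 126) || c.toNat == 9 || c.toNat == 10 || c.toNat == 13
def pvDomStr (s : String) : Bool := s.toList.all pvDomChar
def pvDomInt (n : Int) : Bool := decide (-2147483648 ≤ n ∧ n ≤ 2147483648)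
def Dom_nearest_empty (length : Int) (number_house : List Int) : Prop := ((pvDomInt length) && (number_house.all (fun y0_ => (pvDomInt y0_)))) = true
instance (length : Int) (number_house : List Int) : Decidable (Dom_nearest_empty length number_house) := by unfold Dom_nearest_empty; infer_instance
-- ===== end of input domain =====

-- B replaces A's two directional propagation scans by a zeros-position list with a two-pointer sweep (objective: alternative).

-- ===== PORT A =====
-- the enumerate-loop of calculate_distance, state = (current index, last seen empty position)
def calcGo (length : Int) : List Int → Int → Option Int → List Int
  | [], _, _ => []
  | v :: rest, i, ep =>
    if v = 0 then 0 :: calcGo length rest (i + 1) (some i)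
    else
      match ep with
      | some e => (i - e) :: calcGo length rest (i + 1) (some e)
      | none   => length :: calcGo length rest (i + 1) none

def calculate_distance (length : Int) (number_house : List Int) : List Int :=
  calcGo length number_house 0 none

def nearest_empty (length : Int) (number_house : List Int) : List Int :=
  let distance := calculate_distance length number_house
  let distance_reverse := (calculate_distance length number_house.reverse).reverse
  -- for step in range(length): result.append(min(distance[step], distance_reverse[step]))
  -- distance[step] raises IndexError when length > len(number_house); Pre_ excludes that (getD 0 is never reached inside Pre_)
  (PySem.List.pyRange 0 length 1).map (fun step =>
    min ((PySem.List.pyGet? distance step).getD 0) ((PySem.List.pyGet? distance_reverse step).getD 0))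

-- ===== PORT B =====
-- zeros = [i for i, v in enumerate(number_house) if v == 0]
def zerosGo : List Int → Int → List Int
  | [], _ => []
  | v :: rest, i => if v = 0 then i :: zerosGo rest (i + 1) else zerosGo rest (i + 1)

-- while k < len(zeros) and zeros[k] < step: k += 1   (structural on the fuel zeros.length - k)
def advanceGo (zeros : List Int) (step : Int) : Nat → Nat → Nat
  | 0, k => k
  | fuel + 1, k =>
    if h : k < zeros.length then
      (if zeros[k] < step then advanceGo zeros step fuel (k + 1) else k)
    else k

def advanceK (zeros : List Int) (k : Nat) (step : Int) : Nat :=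
  advanceGo zeros step (zeros.length - k) k

def nearest_empty_alt (length : Int) (number_house : List Int) : List Int :=
  let zeros := zerosGo number_house 0
  ((PySem.List.pyRange 0 length 1).foldl (fun (st : Nat × List Int) step =>
      let k := advanceK zeros st.1 step
      let left := if 0 < k then step - zeros.getD (k - 1) 0 else length
      let right := if k < zeros.length then zeros.getD k 0 - step else length
      (k, st.2 ++ [min left right])) ((0 : Nat), ([] : List Int))).2

-- ===== PRECONDITION & SPEC =====
-- Pre_ excludes length > len(number_house), on which A raises IndexError.
def Pre_nearest_empty (length : Int) (number_house : List Int) : Prop :=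
  length ≤ (number_house.length : Int)
instance (length : Int) (number_house : List Int) : Decidable (Pre_nearest_empty length number_house) := by
  unfold Pre_nearest_empty; infer_instance

def pvWitness_nearest_empty : Int × List Int := (4, [1, 0, 3, 2, 0, 7])

def Spec_nearest_empty (length : Int) (number_house : List Int) (out : List Int) : Prop := out = nearest_empty_alt length number_house
instance (length : Int) (number_house : List Int) (out : List Int) : Decidable (Spec_nearest_empty length number_house out) := by unfold Spec_nearest_empty; infer_instance

-- ===== CLAIM (what is proved, stated in full; the proofs are below) =====
def Claim_equal_nearest_empty : Prop := ∀ (length : Int) (number_house : List Int), Dom_nearest_empty length number_house → Pre_nearest_empty length number_house → Spec_nearest_empty length number_house (nearest_empty length number_house)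

-- ===== LEMMAS AND PROOFS =====

-- last zero position of a scan (proof-side helper mirroring A's empty_position state)
def lastZ : List Int → Int → Option Int → Option Int
  | [], _, ep => ep
  | v :: rest, i, ep => lastZ rest (i + 1) (if v = 0 then some i else ep)

theorem calcGo_length (length : Int) : ∀ (xs : List Int) (i : Int) (ep : Option Int),
    (calcGo length xs i ep).length = xs.length := by
  intro xs; induction xs with
  | nil => intro i ep; simp [calcGo]
  | cons v rest ih =>
    intro i ep
    by_cases hv : v = 0 <;> simp [calcGo, hv]
    · exact ih _ _
    · cases ep <;> simp [ih]

theorem calcGo_getElem (length : Int) : ∀ (xs : List Int) (i : Int) (ep : Option Int)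
    (j : Nat) (hj : j < xs.length),
    (calcGo length xs i ep)[j]'(by rw [calcGo_length]; exact hj) =
      (if xs[j] = 0 then 0 else
        match lastZ (xs.take j) i ep with
        | some e => (i + j) - e
        | none => length) := by
  intro xs; induction xs with
  | nil => intro i ep j hj; simp at hj
  | cons v rest ih =>
    intro i ep j hj
    cases j with
    | zero =>
      by_cases hv : v = 0 <;> simp [calcGo, hv, lastZ]
      cases ep <;> simp
    | succ j =>
      have hj' : j < rest.length := by simpa using hj
      by_cases hv : v = 0
      · simp only [calcGo, if_pos hv, List.getElem_cons_succ, List.take_succ_cons]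
        rw [ih (i + 1) (some i) j hj']
        have hL : lastZ (v :: rest.take j) i ep = lastZ (rest.take j) (i + 1) (some i) := by
          simp [lastZ, hv]
        rw [hL]
        by_cases h0 : rest[j] = 0
        · simp [h0]
        · simp only [if_neg h0]
          cases lastZ (rest.take j) (i + 1) (some i) <;> simp <;> push_cast <;> ring
      · cases ep with
        | some e =>
          simp only [calcGo, if_neg hv, List.getElem_cons_succ, List.take_succ_cons]
          rw [ih (i + 1) (some e) j hj']
          have hL : lastZ (v :: rest.take j) i (some e) = lastZ (rest.take j) (i + 1) (some e) := by
            simp [lastZ, hv]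
          rw [hL]
          by_cases h0 : rest[j] = 0
          · simp [h0]
          · simp only [if_neg h0]
            cases lastZ (rest.take j) (i + 1) (some e) <;> simp <;> push_cast <;> ring
        | none =>
          simp only [calcGo, if_neg hv, List.getElem_cons_succ, List.take_succ_cons]
          rw [ih (i + 1) none j hj']
          have hL : lastZ (v :: rest.take j) i none = lastZ (rest.take j) (i + 1) none := by
            simp [lastZ, hv]
          rw [hL]
          by_cases h0 : rest[j] = 0
          · simp [h0]
          · simp only [if_neg h0]
            cases lastZ (rest.take j) (i + 1) none <;> simp <;> push_cast <;> ring

-- lastZ is the last element of zerosGo (or the carried ep)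
theorem lastZ_eq_zerosGo : ∀ (xs : List Int) (i : Int) (ep : Option Int),
    lastZ xs i ep = match (zerosGo xs i).getLast? with
      | some z => some z
      | none => ep := by
  intro xs; induction xs with
  | nil => intro i ep; simp [lastZ, zerosGo]
  | cons v rest ih =>
    intro i ep
    by_cases hv : v = 0
    · simp only [lastZ, zerosGo, if_pos hv]
      rw [ih]
      cases h : (zerosGo rest (i + 1)).getLast? with
      | none =>
        have : zerosGo rest (i + 1) = [] := List.getLast?_eq_none_iff.mp h
        simp [this]
      | some z =>
        obtain ⟨l, hl⟩ := List.getLast?_eq_some_iff.mp h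
        rw [hl, show i :: (l ++ [z]) = (i :: l) ++ [z] from rfl, List.getLast?_concat]
    · simp only [lastZ, zerosGo, if_neg hv]
      exact ih _ _

theorem zerosGo_append : ∀ (a b : List Int) (i : Int),
    zerosGo (a ++ b) i = zerosGo a i ++ zerosGo b (i + a.length) := by
  intro a; induction a with
  | nil => intro b i; simp [zerosGo]
  | cons v rest ih =>
    intro b i
    have hrec : zerosGo (rest ++ b) (i + 1) = zerosGo rest (i + 1) ++ zerosGo b (i + (v :: rest).length) := by
      rw [ih b (i + 1)]
      congr 2
      simp only [List.length_cons]
      push_cast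
      ring
    by_cases hv : v = 0 <;> simp [zerosGo, hv, hrec]

theorem zerosGo_shift : ∀ (xs : List Int) (i c : Int),
    zerosGo xs (i + c) = (zerosGo xs i).map (· + c) := by
  intro xs; induction xs with
  | nil => intro i c; simp [zerosGo]
  | cons v rest ih =>
    intro i c
    have hrec : zerosGo rest (i + c + 1) = (zerosGo rest (i + 1)).map (· + c) := by
      rw [show i + c + 1 = i + 1 + c by ring, ih (i + 1) c]
    by_cases hv : v = 0 <;> simp [zerosGo, hv, hrec]

theorem zerosGo_mem_bounds : ∀ (xs : List Int) (i : Int) (z : Int),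
    z ∈ zerosGo xs i → i ≤ z ∧ z < i + xs.length := by
  intro xs; induction xs with
  | nil => intro i z h; simp [zerosGo] at h
  | cons v rest ih =>
    intro i z h
    simp only [List.length_cons]
    by_cases hv : v = 0
    · simp only [zerosGo, if_pos hv] at h
      rcases List.mem_cons.mp h with rfl | h
      · push_cast; omega
      · have := ih (i + 1) z h; push_cast at this ⊢; omega
    · simp only [zerosGo, if_neg hv] at h
      have := ih (i + 1) z h; push_cast at this ⊢; omega

theorem zerosGo_sorted : ∀ (xs : List Int) (i : Int), (zerosGo xs i).Pairwise (· < ·) := by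
  intro xs; induction xs with
  | nil => intro i; simp [zerosGo]
  | cons v rest ih =>
    intro i
    by_cases hv : v = 0 <;> simp [zerosGo, hv]
    · refine ⟨fun z hz => ?_, ih _⟩
      have := zerosGo_mem_bounds rest (i + 1) z hz
      omega
    · exact ih _

theorem zerosGo_reverse : ∀ (xs : List Int),
    zerosGo xs.reverse 0 = ((zerosGo xs 0).map (fun z => (xs.length : Int) - 1 - z)).reverse := by
  intro xs; induction xs with
  | nil => simp [zerosGo]
  | cons v rest ih =>
    rw [List.reverse_cons, zerosGo_append, ih]
    have h1 : zerosGo rest 1 = (zerosGo rest 0).map (· + 1) := by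
      simpa using zerosGo_shift rest 0 1
    by_cases hv : v = 0 <;>
      simp [zerosGo, hv, List.length_reverse] <;>
      (rw [h1, List.map_map]; apply List.map_congr_left; intro z _;
       simp only [Function.comp_apply]; ring)

theorem advanceK_eq (zeros : List Int) (k : Nat) (s : Int) :
    advanceK zeros k s =
      if h : k < zeros.length then
        (if zeros[k] < s then advanceK zeros (k + 1) s else k)
      else k := by
  unfold advanceK
  by_cases h : k < zeros.length
  · have hf : zeros.length - k = (zeros.length - (k + 1)) + 1 := by omega
    rw [hf]
    simp only [advanceGo, dif_pos h]
  · have hf : zeros.length - k = 0 := by omega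
    rw [hf]
    simp only [advanceGo, dif_neg h]

theorem advanceK_le_aux (zeros : List Int) (s : Int) : ∀ (n k : Nat),
    zeros.length - k ≤ n → k ≤ zeros.length →
    advanceK zeros k s ≤ zeros.length ∧ k ≤ advanceK zeros k s := by
  intro n
  induction n with
  | zero =>
    intro k h1 h2
    rw [advanceK_eq, dif_neg (by omega : ¬ k < zeros.length)]
    omega
  | succ n ih =>
    intro k h1 h2
    rw [advanceK_eq]
    by_cases h : k < zeros.length
    · rw [dif_pos h]
      by_cases hz : zeros[k] < s
      · rw [if_pos hz]
        have := ih (k + 1) (by omega) (by omega)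
        omega
      · rw [if_neg hz]; omega
    · rw [dif_neg h]; omega

theorem advanceK_le (zeros : List Int) (k : Nat) (s : Int) (hk : k ≤ zeros.length) :
    advanceK zeros k s ≤ zeros.length ∧ k ≤ advanceK zeros k s :=
  advanceK_le_aux zeros s (zeros.length - k) k (le_refl _) hk

theorem advanceK_below_aux (zeros : List Int) (s : Int) : ∀ (n k : Nat),
    zeros.length - k ≤ n → ∀ (m : Nat), k ≤ m → m < advanceK zeros k s →
    ∀ (hm : m < zeros.length), zeros[m] < s := by
  intro n
  induction n with
  | zero =>
    intro k h1 m hkm hm hlen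
    rw [advanceK_eq, dif_neg (by omega : ¬ k < zeros.length)] at hm
    omega
  | succ n ih =>
    intro k h1 m hkm hm hlen
    rw [advanceK_eq] at hm
    by_cases h : k < zeros.length
    · rw [dif_pos h] at hm
      by_cases hz : zeros[k] < s
      · rw [if_pos hz] at hm
        rcases Nat.eq_or_lt_of_le hkm with rfl | hlt
        · exact hz
        · exact ih (k + 1) (by omega) m hlt hm hlen
      · rw [if_neg hz] at hm; omega
    · rw [dif_neg h] at hm; omega

theorem advanceK_below (zeros : List Int) (k : Nat) (s : Int) (m : Nat)
    (hm : m < advanceK zeros k s) (hmk : k ≤ m) (hlen : m < zeros.length) :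
    zeros[m] < s :=
  advanceK_below_aux zeros s (zeros.length - k) k (le_refl _) m hmk hm hlen

theorem advanceK_stop_aux (zeros : List Int) (s : Int) : ∀ (n k : Nat),
    zeros.length - k ≤ n → ∀ (h : advanceK zeros k s < zeros.length),
    ¬ zeros[advanceK zeros k s] < s := by
  intro n
  induction n with
  | zero =>
    intro k h1 h
    rw [advanceK_eq, dif_neg (by omega : ¬ k < zeros.length)] at h
    omega
  | succ n ih =>
    intro k h1 h
    by_cases hk : k < zeros.length
    · by_cases hz : zeros[k] < s
      · have he : advanceK zeros k s = advanceK zeros (k + 1) s := by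
          rw [advanceK_eq, dif_pos hk, if_pos hz]
        simp only [he] at h ⊢
        exact ih (k + 1) (by omega) h
      · have he : advanceK zeros k s = k := by
          rw [advanceK_eq, dif_pos hk, if_neg hz]
        simp only [he]
        exact hz
    · rw [advanceK_eq, dif_neg hk] at h
      omega

theorem advanceK_stop (zeros : List Int) (k : Nat) (s : Int)
    (h : advanceK zeros k s < zeros.length) : ¬ zeros[advanceK zeros k s] < s :=
  advanceK_stop_aux zeros s (zeros.length - k) k (le_refl _) h

theorem advanceK_comp_aux (zeros : List Int) (s s' : Int) (hss : s ≤ s') : ∀ (n k : Nat),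
    zeros.length - k ≤ n →
    advanceK zeros (advanceK zeros k s) s' = advanceK zeros k s' := by
  intro n
  induction n with
  | zero =>
    intro k h1
    rw [advanceK_eq zeros k s, dif_neg (by omega : ¬ k < zeros.length)]
  | succ n ih =>
    intro k h1
    by_cases hk : k < zeros.length
    · by_cases hz : zeros[k] < s
      · have he : advanceK zeros k s = advanceK zeros (k + 1) s := by
          rw [advanceK_eq, dif_pos hk, if_pos hz]
        rw [he, ih (k + 1) (by omega)]
        conv_rhs => rw [advanceK_eq, dif_pos hk, if_pos (by omega : zeros[k] < s')]
      · have he : advanceK zeros k s = k := by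
          rw [advanceK_eq, dif_pos hk, if_neg hz]
        rw [he]
    · have he : advanceK zeros k s = k := by
        rw [advanceK_eq, dif_neg hk]
      rw [he]

theorem advanceK_comp (zeros : List Int) (k : Nat) (s s' : Int) (hss : s ≤ s') :
    advanceK zeros (advanceK zeros k s) s' = advanceK zeros k s' :=
  advanceK_comp_aux zeros s s' hss (zeros.length - k) k (le_refl _)

-- the per-step value B computes, from a restart at pointer 0
def bVal (length : Int) (zeros : List Int) (s : Int) : Int :=
  min (if 0 < advanceK zeros 0 s then s - zeros.getD (advanceK zeros 0 s - 1) 0 else length)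
      (if advanceK zeros 0 s < zeros.length then zeros.getD (advanceK zeros 0 s) 0 - s else length)

theorem bFold_eq_map (length : Int) (zeros : List Int) :
    ∀ (steps : List Int) (k : Nat) (acc : List Int)
      (hk : ∀ s ∈ steps, advanceK zeros k s = advanceK zeros 0 s)
      (hmono : steps.Pairwise (· ≤ ·)),
    (steps.foldl (fun (st : Nat × List Int) step =>
      let k := advanceK zeros st.1 step
      let left := if 0 < k then step - zeros.getD (k - 1) 0 else length
      let right := if k < zeros.length then zeros.getD k 0 - step else length
      (k, st.2 ++ [min left right])) (k, acc)).2 = acc ++ steps.map (bVal length zeros) := by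
  intro steps
  induction steps with
  | nil => intro k acc _ _; simp
  | cons s rest ih =>
    intro k acc hk hmono
    simp only [List.foldl_cons, List.map_cons]
    rw [hk s (List.mem_cons_self ..)]
    have hrest : ∀ s' ∈ rest, advanceK zeros (advanceK zeros 0 s) s' = advanceK zeros 0 s' := by
      intro s' hs'
      exact advanceK_comp zeros 0 s s' ((List.pairwise_cons.mp hmono).1 s' hs')
    rw [ih _ _ hrest (List.pairwise_cons.mp hmono).2]
    simp [bVal]

theorem nearest_empty_alt_eq_map (length : Int) (xs : List Int) :
    nearest_empty_alt length xs =
      (PySem.List.pyRange 0 length 1).map (bVal length (zerosGo xs 0)) := by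
  unfold nearest_empty_alt
  rw [bFold_eq_map length (zerosGo xs 0) _ 0 []]
  · simp
  · intro s _; rfl
  · exact (PySem.List.pairwise_lt_pyRange_one 0 length).imp (fun h => le_of_lt h)

-- the split of zeros at the pointer: zeros of the prefix take j are exactly the first k elements
theorem zeros_split (xs : List Int) (j : Nat) (hj : j ≤ xs.length) :
    zerosGo xs 0 = zerosGo (xs.take j) 0 ++ zerosGo (xs.drop j) j := by
  conv_lhs => rw [← List.take_append_drop j xs]
  rw [zerosGo_append]
  congr 2
  simp [List.length_take, Nat.min_eq_left hj]

theorem take_part_eq_take_k (xs : List Int) (j : Nat) (hj : j ≤ xs.length) :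
    zerosGo (xs.take j) 0 = (zerosGo xs 0).take (advanceK (zerosGo xs 0) 0 (j : Int)) := by
  have hsplit := zeros_split xs j hj
  have hklen := advanceK_le (zerosGo xs 0) 0 (j : Int) (Nat.zero_le _)
  have htlen : (zerosGo (xs.take j) 0).length ≤ (zerosGo xs 0).length := by
    rw [hsplit]; simp
  have hfront : ∀ m (hm : m < (zerosGo (xs.take j) 0).length),
      (zerosGo xs 0)[m]'(by omega) < (j : Int) := by
    intro m hm
    have hg : (zerosGo xs 0)[m]'(by omega) = (zerosGo (xs.take j) 0)[m]'hm := by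
      rw [List.getElem_of_eq hsplit]
      exact List.getElem_append_left ..
    rw [hg]
    have hb := zerosGo_mem_bounds _ _ _ (List.getElem_mem hm)
    have hlt : ((xs.take j).length : Int) ≤ j := by simp [List.length_take]
    omega
  have hback : ∀ m (hm : (zerosGo (xs.take j) 0).length ≤ m) (hm2 : m < (zerosGo xs 0).length),
      (j : Int) ≤ (zerosGo xs 0)[m] := by
    intro m hm hm2
    have hm2' : m < (zerosGo (xs.take j) 0 ++ zerosGo (xs.drop j) (j : Int)).length := by
      rw [← hsplit]; exact hm2
    have hg : (zerosGo xs 0)[m] =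
        (zerosGo (xs.drop j) (j : Int))[m - (zerosGo (xs.take j) 0).length]'(by
          simp at hm2' ⊢; omega) := by
      rw [List.getElem_of_eq hsplit]
      exact List.getElem_append_right hm
    rw [hg]
    exact (zerosGo_mem_bounds _ _ _ (List.getElem_mem _)).1
  have hkt : advanceK (zerosGo xs 0) 0 (j : Int) = (zerosGo (xs.take j) 0).length := by
    rcases Nat.lt_trichotomy (advanceK (zerosGo xs 0) 0 (j : Int)) (zerosGo (xs.take j) 0).length
      with h | h | h
    · have h1 := advanceK_stop (zerosGo xs 0) 0 (j : Int) (by omega)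
      exact absurd (hfront _ (by omega)) h1
    · exact h
    · have h1 := advanceK_below (zerosGo xs 0) 0 (j : Int) (zerosGo (xs.take j) 0).length
        h (Nat.zero_le _) (by omega)
      have h2 := hback _ (le_refl _) (by omega)
      omega
  rw [hkt, hsplit, List.take_left' rfl]

theorem zerosGo_mem_iff : ∀ (xs : List Int) (j : Nat) (hj : j < xs.length),
    ((j : Int) ∈ zerosGo xs 0 ↔ xs[j] = 0) := by
  intro xs j hj
  have hsplit := zeros_split xs j (le_of_lt hj)
  have hdrop : xs.drop j = xs[j] :: xs.drop (j + 1) := List.drop_eq_getElem_cons hj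
  rw [hsplit, hdrop]
  constructor
  · intro h
    rcases List.mem_append.mp h with h | h
    · have := zerosGo_mem_bounds _ _ _ h
      have : ((xs.take j).length : Int) ≤ j := by simp [List.length_take]
      omega
    · by_cases hv : xs[j] = 0
      · exact hv
      · simp only [zerosGo, if_neg hv] at h
        have := zerosGo_mem_bounds _ _ _ h
        omega
  · intro h
    refine List.mem_append.mpr (Or.inr ?_)
    simp [zerosGo, h]

theorem take_getLast? (l : List Int) (k : Nat) (h0 : 0 < k) (h : k ≤ l.length) :
    (l.take k).getLast? = some (l[k - 1]'(by omega)) := by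
  rw [List.getLast?_eq_getElem?]
  simp only [List.length_take, Nat.min_eq_left h]
  rw [List.getElem?_take, if_pos (by omega), List.getElem?_eq_getElem (by omega)]

theorem drop_head? (l : List Int) (k : Nat) (h : k < l.length) :
    (l.drop k).head? = some (l[k]) := by
  rw [List.head?_drop]
  simp [List.getElem?_eq_getElem h]

-- A's left scan at index j, phrased through the zeros list and B's pointer
theorem A_left_char (length : Int) (xs : List Int) (j : Nat) (hj : j < xs.length) :
    (calculate_distance length xs)[j]'(by unfold calculate_distance; rw [calcGo_length]; exact hj) =
      (if xs[j] = 0 then 0 else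
        match ((zerosGo xs 0).take (advanceK (zerosGo xs 0) 0 (j : Int))).getLast? with
        | some e => (j : Int) - e
        | none => length) := by
  unfold calculate_distance
  rw [calcGo_getElem length xs 0 none j hj]
  rw [← take_part_eq_take_k xs j (le_of_lt hj)]
  rw [lastZ_eq_zerosGo]
  by_cases h0 : xs[j] = 0
  · simp [h0]
  · simp only [if_neg h0]
    cases (zerosGo (xs.take j) 0).getLast? with
    | none => rfl
    | some e => simp

-- A's reversed scan at index j, phrased through the zeros list and B's pointer at j+1
theorem A_right_char (length : Int) (xs : List Int) (j : Nat) (hj : j < xs.length) :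
    ((calculate_distance length xs.reverse).reverse)[j]'(by
        unfold calculate_distance; simp [calcGo_length]; exact hj) =
      (if xs[j] = 0 then 0 else
        match ((zerosGo xs 0).drop (advanceK (zerosGo xs 0) 0 ((j : Int) + 1))).head? with
        | some z => z - (j : Int)
        | none => length) := by
  have hlenc : (calculate_distance length xs.reverse).length = xs.length := by
    unfold calculate_distance; rw [calcGo_length]; simp
  rw [List.getElem_reverse]
  simp only [hlenc]
  have hj' : xs.length - 1 - j < xs.reverse.length := by simp; omega
  unfold calculate_distance
  rw [calcGo_getElem length xs.reverse 0 none (xs.length - 1 - j) (by simpa using hj')]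
  have hgetrev : xs.reverse[xs.length - 1 - j]'(by simpa using hj') = xs[j] := by
    rw [List.getElem_reverse]
    congr 1
    omega
  rw [hgetrev]
  by_cases h0 : xs[j] = 0
  · simp [h0]
  · simp only [if_neg h0]
    -- the reversed prefix is the reversed suffix of xs
    have htr : xs.reverse.take (xs.length - 1 - j) = (xs.drop (j + 1)).reverse := by
      rw [List.take_reverse]
      congr 2
      omega
    rw [htr, lastZ_eq_zerosGo, zerosGo_reverse, List.getLast?_reverse, List.head?_map]
    -- the suffix zeros are the global zeros shifted down by j+1
    have hshift : zerosGo (xs.drop (j + 1)) ((j : Int) + 1) =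
        (zerosGo (xs.drop (j + 1)) 0).map (· + ((j : Int) + 1)) := by
      have := zerosGo_shift (xs.drop (j + 1)) 0 ((j : Int) + 1)
      simpa using this
    have hsplit := zeros_split xs (j + 1) (by omega)
    have htake := take_part_eq_take_k xs (j + 1) (by omega)
    have hcast : (((j : Nat) + 1 : Nat) : Int) = (j : Int) + 1 := by push_cast; ring
    rw [hcast] at htake hsplit
    have hdrop : zerosGo (xs.drop (j + 1)) ((j : Int) + 1)
        = (zerosGo xs 0).drop (advanceK (zerosGo xs 0) 0 ((j : Int) + 1)) := by
      apply List.append_cancel_left (as := (zerosGo xs 0).take (advanceK (zerosGo xs 0) 0 ((j : Int) + 1)))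
      rw [List.take_append_drop, ← htake]
      exact hsplit.symm
    rw [← hdrop, hshift, List.head?_map]
    cases hh : (zerosGo (xs.drop (j + 1)) 0).head? with
    | none => rfl
    | some z0 =>
      have hz0 : z0 ∈ zerosGo (xs.drop (j + 1)) 0 := List.mem_of_mem_head? (by rw [hh]; rfl)
      have hb := zerosGo_mem_bounds _ _ _ hz0
      simp only [Option.map_some]
      have hlen2 : ((xs.drop (j + 1)).length : Int) = (xs.length : Int) - (j : Int) - 1 := by
        simp [List.length_drop]
        omega
      rw [hlen2]
      have hnat : ((xs.length - 1 - j : Nat) : Int) = (xs.length : Int) - 1 - (j : Int) := by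
        omega
      rw [hnat]
      ring_nf

-- index of s in zeros when xs[s] = 0: zeros[advanceK] = s itself
theorem zeros_at_self (xs : List Int) (j : Nat) (hj : j < xs.length) (h0 : xs[j] = 0) :
    ∃ hk : advanceK (zerosGo xs 0) 0 (j : Int) < (zerosGo xs 0).length,
      (zerosGo xs 0)[advanceK (zerosGo xs 0) 0 (j : Int)] = (j : Int) := by
  have hmem : (j : Int) ∈ zerosGo xs 0 := (zerosGo_mem_iff xs j hj).mpr h0
  obtain ⟨m, hm, hgm⟩ := List.mem_iff_getElem.mp hmem
  have hsor := zerosGo_sorted xs 0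
  have hkle := advanceK_le (zerosGo xs 0) 0 (j : Int) (Nat.zero_le _)
  -- m is not below the pointer (its value is not < j)
  have hmk : advanceK (zerosGo xs 0) 0 (j : Int) ≤ m := by
    by_contra hc
    have := advanceK_below (zerosGo xs 0) 0 (j : Int) m (by omega) (Nat.zero_le _) hm
    omega
  have hklt : advanceK (zerosGo xs 0) 0 (j : Int) < (zerosGo xs 0).length := by omega
  refine ⟨hklt, ?_⟩
  have hstop := advanceK_stop (zerosGo xs 0) 0 (j : Int) hklt
  rcases Nat.eq_or_lt_of_le hmk with rfl | hlt
  · exact hgm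
  · have := List.pairwise_iff_getElem.mp hsor _ m hklt hm hlt
    omega

-- the heart: for 0 ≤ s < length ≤ n, A's per-step value equals bVal
theorem perStep_eq (length : Int) (xs : List Int) (hlen : length ≤ (xs.length : Int))
    (s : Int) (hs0 : 0 ≤ s) (hs1 : s < length) :
    min ((PySem.List.pyGet? (calculate_distance length xs) s).getD 0)
        ((PySem.List.pyGet? (calculate_distance length xs.reverse).reverse s).getD 0)
      = bVal length (zerosGo xs 0) s := by
  obtain ⟨j, rfl⟩ : ∃ j : Nat, s = (j : Int) := ⟨s.toNat, (Int.toNat_of_nonneg hs0).symm⟩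
  have hj : j < xs.length := by omega
  have h1 : PySem.List.pyGet? (calculate_distance length xs) (j : Int)
      = some ((calculate_distance length xs)[j]'(by
          unfold calculate_distance; rw [calcGo_length]; exact hj)) := by
    rw [PySem.List.pyGet?_natCast]
    exact List.getElem?_eq_getElem _
  have h2 : PySem.List.pyGet? (calculate_distance length xs.reverse).reverse (j : Int)
      = some (((calculate_distance length xs.reverse).reverse)[j]'(by
          unfold calculate_distance; simp [calcGo_length]; exact hj)) := by
    rw [PySem.List.pyGet?_natCast]
    exact List.getElem?_eq_getElem _
  rw [h1, h2, Option.getD_some, Option.getD_some, A_left_char length xs j hj,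
    A_right_char length xs j hj]
  have hkle := advanceK_le (zerosGo xs 0) 0 (j : Int) (Nat.zero_le _)
  have hsor := zerosGo_sorted xs 0
  by_cases h0 : xs[j] = 0
  · -- both scans give 0; B's right distance is 0 and its left is nonnegative
    simp only [if_pos h0]
    obtain ⟨hk, hkv⟩ := zeros_at_self xs j hj h0
    unfold bVal
    rw [if_pos hk]
    have hr : (zerosGo xs 0).getD (advanceK (zerosGo xs 0) 0 (j : Int)) 0 = (j : Int) := by
      rw [List.getD_eq_getElem _ _ hk]
      exact hkv
    rw [hr]
    by_cases hkpos : 0 < advanceK (zerosGo xs 0) 0 (j : Int)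
    · rw [if_pos hkpos]
      have hbelow := advanceK_below (zerosGo xs 0) 0 (j : Int)
        (advanceK (zerosGo xs 0) 0 (j : Int) - 1) (by omega) (Nat.zero_le _) (by omega)
      rw [List.getD_eq_getElem _ _ (by omega)]
      omega
    · rw [if_neg hkpos]
      omega
  · simp only [if_neg h0]
    -- with xs[j] ≠ 0 the pointer at j and at j+1 agree
    have hk1 : advanceK (zerosGo xs 0) 0 ((j : Int) + 1) = advanceK (zerosGo xs 0) 0 (j : Int) := by
      have htj := take_part_eq_take_k xs j (le_of_lt hj)
      have htj1 := take_part_eq_take_k xs (j + 1) (by omega)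
      have hsucc : xs.take (j + 1) = xs.take j ++ [xs[j]] := by
        rw [List.take_succ]
        simp [List.getElem?_eq_getElem hj]
      have hz1 : zerosGo (xs.take (j + 1)) 0 = zerosGo (xs.take j) 0 := by
        rw [hsucc, zerosGo_append]
        simp [zerosGo, h0]
      have hkle1 := advanceK_le (zerosGo xs 0) 0 ((j : Int) + 1) (Nat.zero_le _)
      have hcast : (((j : Nat) + 1 : Nat) : Int) = (j : Int) + 1 := by push_cast; ring
      rw [hcast] at htj1
      have heq : (zerosGo xs 0).take (advanceK (zerosGo xs 0) 0 ((j : Int) + 1))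
          = (zerosGo xs 0).take (advanceK (zerosGo xs 0) 0 (j : Int)) := by
        rw [← htj1, ← htj, hz1]
      have := congrArg List.length heq
      simp only [List.length_take] at this
      omega
    rw [hk1]
    unfold bVal
    by_cases hkpos : 0 < advanceK (zerosGo xs 0) 0 (j : Int)
    · rw [if_pos hkpos,
        take_getLast? (zerosGo xs 0) (advanceK (zerosGo xs 0) 0 (j : Int)) hkpos hkle.1]
      by_cases hk : advanceK (zerosGo xs 0) 0 (j : Int) < (zerosGo xs 0).length
      · rw [if_pos hk, drop_head? _ _ hk]
        rw [List.getD_eq_getElem _ _ (by omega), List.getD_eq_getElem _ _ hk]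
      · rw [if_neg hk]
        have hde : ((zerosGo xs 0).drop (advanceK (zerosGo xs 0) 0 (j : Int))).head? = none := by
          simp
          omega
        rw [hde]
        rw [List.getD_eq_getElem _ _ (by omega)]
    · rw [if_neg hkpos]
      have hk0 : advanceK (zerosGo xs 0) 0 (j : Int) = 0 := by omega
      rw [hk0]
      simp only [List.take_zero, List.getLast?_nil, List.drop_zero]
      by_cases hk : 0 < (zerosGo xs 0).length
      · have hh : (zerosGo xs 0).head? = some ((zerosGo xs 0)[0]) := by
          have := drop_head? (zerosGo xs 0) 0 hk
          simpa using this
        rw [hh, if_pos hk, List.getD_eq_getElem _ _ hk]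
      · have hnil : zerosGo xs 0 = [] := List.eq_nil_of_length_eq_zero (by omega)
        rw [hnil]
        simp

theorem nearest_empty_eq (length : Int) (xs : List Int) (hlen : length ≤ (xs.length : Int)) :
    nearest_empty length xs = nearest_empty_alt length xs := by
  rw [nearest_empty_alt_eq_map]
  unfold nearest_empty
  apply List.map_congr_left
  intro s hs
  have := (PySem.List.mem_pyRange_one (a := 0) (b := length)).mp hs
  exact perStep_eq length xs hlen s this.1 this.2

-- ===== VERDICT (by name: the statement is the Claim_ definition above) =====
theorem nearest_empty_spec : Claim_equal_nearest_empty := by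
  intro length number_house _ hpre
  unfold Spec_nearest_empty
  exact nearest_empty_eq length number_house hpre
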